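-- pv_equiv track=rewrite | github.com/LuisPalominoTrevilla/CompetitiveProgramming | Romaji.py | isBerlanese
-- ===== SOURCE A (Python) =====
-- def isBerlanese(word):
--     vowels = "aeiou"
--     n = len(word)
--     if word[n-1] != 'n' and word[n-1] not in vowels:
--         return 'NO'
--     for i in range(n-1):
--         if word[i] not in vowels and word[i] != 'n' and word[i+1] not in vowels:
--             return 'NO'
--     return 'YES'
-- ===== SOURCE B (Python) =====
-- def isBerlanese(word):
--     # Split the word into maximal consonant runs (vowels act as separators),
--     # then validate each run: a consonant followed by another consonant must
--     # be 'n', and a run at the very end of the word must consist of 'n's only.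
--     runs, cur = [], ''
--     for c in word:
--         if c in 'aeiou':
--             runs.append(cur)
--             cur = ''
--         else:
--             cur += c
--     if any(ch != 'n' for run in runs for ch in run[:-1]):
--         return 'NO'
--     return 'YES' if all(ch == 'n' for ch in cur) else 'NO'
-- ===== Notes on version B (the rewrite author's own statement) =====
-- stated objective: alternative
-- what changed: A scans adjacent index pairs with a separate last-character guard and early returns; B first splits the word into maximal consonant runs (vowels as separators) in one grouping pass and then validates the runs: every consonant except a run's last must be 'n', and the word-final run must be all 'n'.
import Mathlib
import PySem

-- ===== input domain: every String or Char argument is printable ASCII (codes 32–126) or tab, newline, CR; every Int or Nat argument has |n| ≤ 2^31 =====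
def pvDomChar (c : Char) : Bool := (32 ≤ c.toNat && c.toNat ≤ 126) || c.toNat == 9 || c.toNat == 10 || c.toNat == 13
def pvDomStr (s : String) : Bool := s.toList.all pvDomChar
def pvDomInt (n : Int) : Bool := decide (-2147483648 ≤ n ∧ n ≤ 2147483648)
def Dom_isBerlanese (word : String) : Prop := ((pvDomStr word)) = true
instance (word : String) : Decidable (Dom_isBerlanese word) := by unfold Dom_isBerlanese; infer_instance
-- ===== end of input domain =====

-- B replaces A's adjacent-index-pair scan (with a separate last-character guard) by a two-stage run decomposition: group the word into maximal consonant runs with vowels as separators, then validate each run (alternative decomposition; same O(n) cost). A raises IndexError on "" (excluded by Pre_).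


-- ===== PORT A =====
-- loop 'for i in range(n-1): if word[i] not in vowels and word[i] != 'n' and word[i+1] not in vowels: return NO'
def isBerlaneseLoop (cs : List Char) : List Int → String
  | [] => "YES"
  | i :: rest =>
      if (!("aeiou".toList.contains (PySem.List.pyGetD cs i ' '))
          && PySem.List.pyGetD cs i ' ' != 'n'
          && !("aeiou".toList.contains (PySem.List.pyGetD cs (i+1) ' '))) = true
      then "NO" else isBerlaneseLoop cs rest

def isBerlanese (word : String) : String :=
  if (PySem.List.pyGetD word.toList ((word.toList.length : Int) - 1) ' ' != 'n'
      && !("aeiou".toList.contains (PySem.List.pyGetD word.toList ((word.toList.length : Int) - 1) ' '))) = true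
  then "NO"
  else isBerlaneseLoop word.toList (PySem.List.pyRange 0 ((word.toList.length : Int) - 1) 1)

-- ===== PORT B =====
-- grouping pass: 'for c in word: if c in "aeiou": runs.append(cur); cur = "" else: cur += c'
def altStep (st : List (List Char) × List Char) (c : Char) : List (List Char) × List Char :=
  if "aeiou".toList.contains c then (st.1 ++ [st.2], []) else (st.1, st.2 ++ [c])

def isBerlanese_alt (word : String) : String :=
  let st := word.toList.foldl altStep ([], [])
  if st.1.any (fun run => run.dropLast.any (fun ch => ch != 'n')) then "NO"
  else if st.2.all (fun ch => ch == 'n') then "YES" else "NO"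

-- ===== PRECONDITION & SPEC =====
-- Pre_ excludes only the empty string, on which A raises IndexError (word[n-1] with n = 0).
def Pre_isBerlanese (word : String) : Prop := word.toList ≠ []
instance (word : String) : Decidable (Pre_isBerlanese word) := by unfold Pre_isBerlanese; infer_instance
def pvWitness_isBerlanese : String := "codeforces"

def Spec_isBerlanese (word : String) (out : String) : Prop := out = isBerlanese_alt word
instance (word : String) (out : String) : Decidable (Spec_isBerlanese word out) := by unfold Spec_isBerlanese; infer_instance

-- ===== CLAIM (what is proved, stated in full; the proofs are below) =====
def Claim_equal_isBerlanese : Prop := ∀ (word : String), Dom_isBerlanese word → Pre_isBerlanese word → Spec_isBerlanese word (isBerlanese word)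

-- ===== LEMMAS AND PROOFS =====

-- proof-only abbreviations
def pvVowel (c : Char) : Bool := "aeiou".toList.contains c
def pvHardC (c : Char) : Bool := !pvVowel c && c != 'n'
def pvHard (cs : List Char) (i : Int) : Bool := pvHardC (PySem.List.pyGetD cs i ' ')

-- the Berlanese rule as a structural recursion over the character list
def pvGood : List Char → Bool
  | [] => true
  | [a] => !pvHardC a
  | a :: b :: t => (!pvHardC a || pvVowel b) && pvGood (b :: t)

-- A-side: the loop says YES iff no listed index is a violation
lemma isBerlaneseLoop_yes_iff (cs : List Char) (l : List Int) :
    isBerlaneseLoop cs l = "YES" ↔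
      ∀ i ∈ l, ¬ (pvHard cs i = true ∧ pvVowel (PySem.List.pyGetD cs (i+1) ' ') = false) := by
  induction l with
  | nil => simp [isBerlaneseLoop]
  | cons i rest ih =>
      simp only [isBerlaneseLoop, List.mem_cons]
      split_ifs with h
      · simp only [Bool.and_eq_true, Bool.not_eq_true', bne_iff_ne] at h
        constructor
        · intro hc; exact absurd hc (by decide)
        · intro hall
          have hbad : pvHard cs i = true ∧ pvVowel (PySem.List.pyGetD cs (i+1) ' ') = false := by
            simp only [pvHard, pvHardC, pvVowel, Bool.and_eq_true, Bool.not_eq_true', bne_iff_ne]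
            exact ⟨⟨h.1.1, h.1.2⟩, h.2⟩
          exact absurd hbad (hall i (Or.inl rfl))
      · rw [ih]
        constructor
        · intro hall j hj
          rcases hj with rfl | hj
          · intro ⟨hh, hv⟩
            apply h
            simp only [pvHard, pvHardC, pvVowel, Bool.and_eq_true, Bool.not_eq_true', bne_iff_ne] at hh hv ⊢
            exact ⟨⟨hh.1, hh.2⟩, hv⟩
          · exact hall j hj
        · intro hall j hj; exact hall j (Or.inr hj)

lemma isBerlaneseLoop_cases (cs : List Char) (l : List Int) :
    isBerlaneseLoop cs l = "YES" ∨ isBerlaneseLoop cs l = "NO" := by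
  induction l with
  | nil => left; rfl
  | cons i rest ih => simp only [isBerlaneseLoop]; split_ifs <;> simp [ih]

lemma isBerlanese_cases (word : String) :
    isBerlanese word = "YES" ∨ isBerlanese word = "NO" := by
  unfold isBerlanese
  split_ifs
  · right; rfl
  · exact isBerlaneseLoop_cases _ _

-- characterization of A on a nonempty word (Int indices, as A computes)
lemma isBerlanese_yes_iff (word : String) (_h : word.toList ≠ []) :
    isBerlanese word = "YES" ↔
      (¬ pvHard word.toList ((word.toList.length : Int) - 1) = true) ∧
      ∀ i : Int, 0 ≤ i → i < (word.toList.length : Int) - 1 →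
        ¬ (pvHard word.toList i = true ∧ pvVowel (PySem.List.pyGetD word.toList (i+1) ' ') = false) := by
  unfold isBerlanese
  split_ifs with hguard
  · constructor
    · intro hc; exact absurd hc (by decide)
    · intro ⟨hlast, _⟩
      exfalso; apply hlast
      simp only [Bool.and_eq_true, Bool.not_eq_true', bne_iff_ne] at hguard
      simp only [pvHard, pvHardC, pvVowel, Bool.and_eq_true, Bool.not_eq_true', bne_iff_ne]
      exact ⟨hguard.2, hguard.1⟩
  · rw [isBerlaneseLoop_yes_iff]
    constructor
    · intro hall
      refine ⟨?_, fun i h0 hlt => hall i (by rw [PySem.List.mem_pyRange_one]; exact ⟨h0, hlt⟩)⟩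
      intro hh
      simp only [pvHard, pvHardC, pvVowel, Bool.and_eq_true, Bool.not_eq_true', bne_iff_ne] at hh
      exact hguard (by simp only [Bool.and_eq_true, Bool.not_eq_true', bne_iff_ne]; exact ⟨hh.2, hh.1⟩)
    · intro ⟨_, hall⟩ i hi
      rw [PySem.List.mem_pyRange_one] at hi
      exact hall i hi.1 hi.2

-- Nat-index characterization of pvGood
lemma pvGood_iff (cs : List Char) :
    pvGood cs = true ↔
      (∀ k : Nat, (hk : k + 1 < cs.length) →
          pvHardC (cs[k]'(by omega)) = true → pvVowel (cs[k+1]'hk) = true) ∧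
      (∀ h : cs ≠ [], pvHardC (cs.getLast h) = false) := by
  induction cs with
  | nil => simp [pvGood]
  | cons a t ih =>
      cases t with
      | nil =>
          simp only [pvGood, Bool.not_eq_true']
          constructor
          · intro h; exact ⟨fun k hk => by simp at hk, fun _ => by simpa using h⟩
          · intro ⟨_, hl⟩; simpa using hl (by simp)
      | cons b t' =>
          simp only [pvGood, Bool.and_eq_true, Bool.or_eq_true, Bool.not_eq_true'] at *
          rw [ih]
          constructor
          · intro ⟨h0, hpairs, hlast⟩
            refine ⟨?_, ?_⟩
            · intro k hk
              cases k with
              | zero =>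
                  intro hh
                  simp only [List.getElem_cons_zero, List.getElem_cons_succ] at hh ⊢
                  rcases h0 with h0 | h0
                  · rw [hh] at h0; exact absurd h0 (by decide)
                  · exact h0
              | succ k' =>
                  intro hh
                  simp only [List.getElem_cons_succ] at hh ⊢
                  exact hpairs k' (by simpa using hk) hh
            · intro _
              rw [List.getLast_cons (by simp)]
              exact hlast (by simp)
          · intro ⟨hpairs, hlast⟩
            refine ⟨?_, ?_, ?_⟩
            · by_cases hh : pvHardC a = true
              · right
                have := hpairs 0 (by simp) (by simpa using hh)
                simpa using this
              · left; simpa using hh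
            · intro k hk hh
              have := hpairs (k+1) (by simpa using hk)
              simp only [List.getElem_cons_succ] at this
              exact this hh
            · intro _
              have := hlast (by simp)
              rwa [List.getLast_cons (by simp)] at this

-- A equals the if-pvGood form on nonempty input
lemma pvA_eq_good (word : String) (h : word.toList ≠ []) :
    isBerlanese word = if pvGood word.toList then "YES" else "NO" := by
  have hn : 0 < word.toList.length := List.length_pos_iff.mpr h
  have key : isBerlanese word = "YES" ↔ pvGood word.toList = true := by
    rw [isBerlanese_yes_iff word h, pvGood_iff]
    constructor
    · intro ⟨hlast, hint⟩
      constructor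
      · intro k hk hh
        have := hint (k : Int) (by omega) (by omega)
        rw [pvHard, PySem.List.pyGetD_eq_getElem word.toList ' ' (by omega) (by omega)] at this
        simp only [Int.toNat_natCast] at this
        by_contra hv
        apply this
        refine ⟨hh, ?_⟩
        rw [show ((k : Int) + 1) = ((k + 1 : Nat) : Int) by push_cast; ring,
          PySem.List.pyGetD_eq_getElem word.toList ' ' (by omega) (by omega)]
        simp only [Int.toNat_natCast]
        simpa using hv
      · intro _
        rw [List.getLast_eq_getElem]
        by_contra hc
        apply hlast
        rw [pvHard, PySem.List.pyGetD_eq_getElem word.toList ' ' (by omega) (by omega)]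
        have hcast : ((word.toList.length : Int) - 1).toNat = word.toList.length - 1 := by omega
        simp only [hcast]
        simpa using hc
    · intro ⟨hpairs, hlast⟩
      constructor
      · intro hh
        rw [pvHard, PySem.List.pyGetD_eq_getElem word.toList ' ' (by omega) (by omega)] at hh
        have hcast : ((word.toList.length : Int) - 1).toNat = word.toList.length - 1 := by omega
        simp only [hcast] at hh
        have := hlast h
        rw [List.getLast_eq_getElem] at this
        rw [this] at hh
        exact absurd hh (by decide)
      · intro i h0 hlt ⟨hh, hv⟩
        have hk : i.toNat + 1 < word.toList.length := by omega
        rw [pvHard, PySem.List.pyGetD_eq_getElem word.toList ' ' h0 (by omega)] at hh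
        have := hpairs i.toNat hk hh
        rw [show i + 1 = ((i.toNat + 1 : Nat) : Int) by omega,
          PySem.List.pyGetD_eq_getElem word.toList ' ' (by omega) (by omega)] at hv
        simp only [Int.toNat_natCast] at hv
        rw [this] at hv
        exact absurd hv (by decide)
  rcases isBerlanese_cases word with h1 | h1
  · rw [h1]; rw [h1] at key; rw [if_pos (key.mp rfl)]
  · rw [h1]
    by_cases hg : pvGood word.toList = true
    · exfalso; have := key.mpr hg; rw [h1] at this; exact absurd this (by decide)
    · rw [if_neg hg]

-- B-side: the final check, as a function of the fold state
def pvFin (st : List (List Char) × List Char) : Bool :=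
  !st.1.any (fun run => run.dropLast.any (fun ch => ch != 'n')) && st.2.all (fun ch => ch == 'n')

lemma pvAlt_eq_fin (word : String) :
    isBerlanese_alt word = if pvFin (word.toList.foldl altStep ([], [])) then "YES" else "NO" := by
  unfold isBerlanese_alt pvFin
  cases h1 : (word.toList.foldl altStep ([], [])).1.any (fun run => run.dropLast.any (fun ch => ch != 'n')) <;>
    cases h2 : (word.toList.foldl altStep ([], [])).2.all (fun ch => ch == 'n') <;> simp [h1, h2]

-- for a vowel-free run, "all of it is 'n'" is exactly pvGood of the run
lemma pvGood_run (cur : List Char) (hcur : cur.all (fun c => !pvVowel c) = true) :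
    pvGood cur = cur.all (fun ch => ch == 'n') := by
  induction cur with
  | nil => rfl
  | cons a t ih =>
      simp only [List.all_cons, Bool.and_eq_true] at hcur
      have ha : pvHardC a = !(a == 'n') := by
        simp only [pvHardC, hcur.1, bne]
        cases a == 'n' <;> simp
      cases t with
      | nil => simp [pvGood, ha]
      | cons b t' =>
          have hb : pvVowel b = false := by
            have := hcur.2
            simp only [List.all_cons, Bool.and_eq_true] at this
            simpa using this.1
          rw [show pvGood (a :: b :: t') = ((!pvHardC a || pvVowel b) && pvGood (b :: t')) from rfl]
          rw [ha, hb, ih hcur.2]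
          simp [List.all_cons]

-- prepending a vowel-free run before a vowel splits pvGood
lemma pvGood_split (cur : List Char) (c : Char) (t : List Char)
    (hcur : cur.all (fun c => !pvVowel c) = true) (hc : pvVowel c = true) :
    pvGood (cur ++ c :: t) = (cur.dropLast.all (fun ch => ch == 'n') && pvGood (c :: t)) := by
  induction cur with
  | nil => simp
  | cons a cur' ih =>
      simp only [List.all_cons, Bool.and_eq_true] at hcur
      cases cur' with
      | nil => simp [pvGood, hc]
      | cons a2 cur'' =>
          have ha2 : pvVowel a2 = false := by
            have := hcur.2
            simp only [List.all_cons, Bool.and_eq_true] at this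
            simpa using this.1
          have ha : pvHardC a = !(a == 'n') := by
            simp only [pvHardC, hcur.1, bne]
            cases a == 'n' <;> simp
          simp only [List.cons_append, pvGood, ha, ha2, Bool.or_false, Bool.not_not]
          rw [show (a2 :: cur'') ++ c :: t = a2 :: (cur'' ++ c :: t) by simp] at *
          rw [ih hcur.2]
          simp only [List.dropLast_cons₂, List.all_cons, Bool.and_assoc]

-- a leading vowel imposes nothing
lemma pvGood_vowel_cons (c : Char) (t : List Char) (hc : pvVowel c = true) :
    pvGood (c :: t) = pvGood t := by
  have hcf : pvHardC c = false := by simp [pvHardC, hc]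
  cases t with
  | nil => simp [pvGood, hcf]
  | cons b t' => simp [pvGood, hcf]

-- the grouping fold computes pvGood of the remaining input (with vowel-free carry)
lemma pvFold_fin (cs : List Char) (runs : List (List Char)) (cur : List Char)
    (hcur : cur.all (fun c => !pvVowel c) = true) :
    pvFin (cs.foldl altStep (runs, cur)) =
      (!runs.any (fun run => run.dropLast.any (fun ch => ch != 'n')) && pvGood (cur ++ cs)) := by
  induction cs generalizing runs cur with
  | nil =>
      simp only [List.foldl_nil, pvFin, List.append_nil]
      rw [pvGood_run cur hcur]
  | cons c t ih =>
      simp only [List.foldl_cons, altStep]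
      by_cases hc : ("aeiou".toList.contains c) = true
      · rw [if_pos hc]
        rw [ih (runs ++ [cur]) [] (by simp)]
        rw [pvGood_split cur c t hcur (by simpa [pvVowel] using hc)]
        rw [pvGood_vowel_cons c t (by simpa [pvVowel] using hc)]
        simp only [List.any_append, List.any_cons, List.any_nil, Bool.or_false, Bool.not_or,
          List.nil_append]
        have hrw : (!cur.dropLast.any fun ch => ch != 'n') = cur.dropLast.all (fun ch => ch == 'n') := by
          induction cur.dropLast with
          | nil => rfl
          | cons x xs ihx =>
              simp only [List.any_cons, List.all_cons, Bool.not_or, ihx]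
              cases h : x == 'n' <;> simp [bne, h]
        rw [hrw]
        ac_rfl
      · rw [if_neg hc]
        rw [ih runs (cur ++ [c]) (by
          simp only [List.all_append, List.all_cons, List.all_nil, Bool.and_true, Bool.and_eq_true]
          exact ⟨hcur, by simpa [pvVowel] using hc⟩)]
        simp

lemma pvAlt_eq_good (word : String) :
    isBerlanese_alt word = if pvGood word.toList then "YES" else "NO" := by
  rw [pvAlt_eq_fin, pvFold_fin word.toList [] [] (by simp)]
  simp

-- ===== VERDICT (by name: the statement is the Claim_ definition above) =====
theorem isBerlanese_spec : Claim_equal_isBerlanese := by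
  intro word _ hpre
  show isBerlanese word = isBerlanese_alt word
  rw [pvA_eq_good word hpre, pvAlt_eq_good]
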